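-- pv_equiv track=rewrite | github.com/narmawork-source/MoodCraft-AI | app.py | keyword_retriever
-- ===== SOURCE A (Python) =====
-- from typing import Dict, List, Tuple
--
-- SECTION_IDS = ["time", "product_region", "demographics", "statistics"]
--
-- def keyword_retriever(question: str) -> List[str]:
--     q = question.lower()
--     selected = set()
--
--     if any(w in q for w in ["time", "month", "quarter", "year", "trend", "growth", "season"]):
--         selected.add("time")
--     if any(w in q for w in ["product", "region", "place", "area", "west", "east", "north", "south"]):
--         selected.add("product_region")
--     if any(w in q for w in ["customer", "buyer", "demographic", "gender", "age", "segment"]):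
--         selected.add("demographics")
--     if any(w in q for w in ["median", "mean", "std", "standard deviation", "stat", "distribution"]):
--         selected.add("statistics")
--
--     if not selected:
--         selected = set(SECTION_IDS)
--
--     return sorted(selected)
-- ===== SOURCE B (Python) =====
-- SECTION_IDS = ["time", "product_region", "demographics", "statistics"]
--
-- # (keyword, section) pairs; SORTED_IDS is SECTION_IDS in sorted order.
-- KEYWORD_SECTIONS = [
--     ("time", "time"), ("month", "time"), ("quarter", "time"), ("year", "time"),
--     ("trend", "time"), ("growth", "time"), ("season", "time"),
--     ("product", "product_region"), ("region", "product_region"), ("place", "product_region"),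
--     ("area", "product_region"), ("west", "product_region"), ("east", "product_region"),
--     ("north", "product_region"), ("south", "product_region"),
--     ("customer", "demographics"), ("buyer", "demographics"), ("demographic", "demographics"),
--     ("gender", "demographics"), ("age", "demographics"), ("segment", "demographics"),
--     ("median", "statistics"), ("mean", "statistics"), ("std", "statistics"),
--     ("standard deviation", "statistics"), ("stat", "statistics"), ("distribution", "statistics"),
-- ]
--
-- SORTED_IDS = ["demographics", "product_region", "statistics", "time"]
--
-- def keyword_retriever(question: str):
--     # Single left-to-right scan of the question: at each position, check which
--     # keywords start there (prefix test), instead of one substring search per keyword.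
--     q = question.lower()
--     selected = set()
--     for i in range(len(q)):
--         for w, sid in KEYWORD_SECTIONS:
--             if sid not in selected and q.startswith(w, i):
--                 selected.add(sid)
--     if not selected:
--         selected = set(SECTION_IDS)
--     return [s for s in SORTED_IDS if s in selected]
-- ===== Notes on version B (the rewrite author's own statement) =====
-- stated objective: alternative
-- what changed: Replaces A's per-keyword substring searches ('w in q' for each of 27 keywords) by a single left-to-right scan over the question's positions with prefix tests against a flat (keyword, section) table, and emits the result by filtering the pre-sorted id list instead of calling sorted().
import Mathlib
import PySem

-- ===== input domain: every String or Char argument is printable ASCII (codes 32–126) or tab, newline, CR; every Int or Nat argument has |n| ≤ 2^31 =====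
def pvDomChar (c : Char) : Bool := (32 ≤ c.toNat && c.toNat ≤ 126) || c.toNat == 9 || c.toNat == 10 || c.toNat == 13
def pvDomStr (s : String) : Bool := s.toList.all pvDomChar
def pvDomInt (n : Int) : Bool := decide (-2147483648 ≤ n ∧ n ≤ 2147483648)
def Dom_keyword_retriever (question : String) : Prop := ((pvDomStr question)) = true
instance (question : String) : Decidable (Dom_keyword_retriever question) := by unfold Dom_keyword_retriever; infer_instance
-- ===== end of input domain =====

-- B replaces A's per-keyword substring searches by a single positional scan of the
-- question with prefix tests against a flat (keyword, section) table, emitting the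
-- result by filtering the pre-sorted id list (objective: alternative).

-- ===== PORT A =====
def SECTION_IDS : List String := ["time", "product_region", "demographics", "statistics"]

def keyword_retriever (question : String) : List String :=
  let q := PySem.Str.lower question
  let selected : PySem.Set String := PySem.Set.empty
  let selected := if ["time", "month", "quarter", "year", "trend", "growth", "season"].any
      (fun w => PySem.Str.isIn w q) then PySem.Set.add selected "time" else selected
  let selected := if ["product", "region", "place", "area", "west", "east", "north", "south"].any
      (fun w => PySem.Str.isIn w q) then PySem.Set.add selected "product_region" else selected
  let selected := if ["customer", "buyer", "demographic", "gender", "age", "segment"].any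
      (fun w => PySem.Str.isIn w q) then PySem.Set.add selected "demographics" else selected
  let selected := if ["median", "mean", "std", "standard deviation", "stat", "distribution"].any
      (fun w => PySem.Str.isIn w q) then PySem.Set.add selected "statistics" else selected
  let selected := if selected = [] then PySem.Set.ofList SECTION_IDS else selected
  PySem.List.sorted selected (fun x => x) false

-- ===== PORT B =====
def KEYWORD_SECTIONS : List (String × String) :=
  [("time", "time"), ("month", "time"), ("quarter", "time"), ("year", "time"),
   ("trend", "time"), ("growth", "time"), ("season", "time"),
   ("product", "product_region"), ("region", "product_region"), ("place", "product_region"),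
   ("area", "product_region"), ("west", "product_region"), ("east", "product_region"),
   ("north", "product_region"), ("south", "product_region"),
   ("customer", "demographics"), ("buyer", "demographics"), ("demographic", "demographics"),
   ("gender", "demographics"), ("age", "demographics"), ("segment", "demographics"),
   ("median", "statistics"), ("mean", "statistics"), ("std", "statistics"),
   ("standard deviation", "statistics"), ("stat", "statistics"), ("distribution", "statistics")]

def SORTED_IDS : List String := ["demographics", "product_region", "statistics", "time"]

def keyword_retriever_alt (question : String) : List String :=
  let q := PySem.Str.lower question
  let selected : PySem.Set String :=
    (PySem.List.pyRange 0 (PySem.Str.len q) 1).foldl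
      (fun acc i =>
        KEYWORD_SECTIONS.foldl
          (fun acc2 p =>
            -- q.startswith(w, i): exact for 0 ≤ i < len(q), which range(len(q)) guarantees
            if !(PySem.Set.contains acc2 p.2)
                && PySem.Chars.startswith (q.toList.drop i.toNat) p.1.toList
            then PySem.Set.add acc2 p.2 else acc2)
          acc)
      PySem.Set.empty
  let selected := if selected = [] then PySem.Set.ofList SECTION_IDS else selected
  SORTED_IDS.filter (fun s => PySem.Set.contains selected s)

-- ===== PRECONDITION & SPEC =====
def Spec_keyword_retriever (question : String) (out : List String) : Prop := out = keyword_retriever_alt question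
instance (question : String) (out : List String) : Decidable (Spec_keyword_retriever question out) := by unfold Spec_keyword_retriever; infer_instance

-- ===== CLAIM (what is proved, stated in full; the proofs are below) =====
def Claim_equal_keyword_retriever : Prop := ∀ (question : String), Dom_keyword_retriever question → Spec_keyword_retriever question (keyword_retriever question)

-- ===== LEMMAS AND PROOFS =====

-- proof-side name for B's scan (definitionally the fold inside keyword_retriever_alt)
def pvSel (q : String) : PySem.Set String :=
  (PySem.List.pyRange 0 (PySem.Str.len q) 1).foldl
    (fun acc i =>
      KEYWORD_SECTIONS.foldl
        (fun acc2 p =>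
          if !(PySem.Set.contains acc2 p.2)
              && PySem.Chars.startswith (q.toList.drop i.toNat) p.1.toList
          then PySem.Set.add acc2 p.2 else acc2)
        acc)
    PySem.Set.empty

theorem pv_alt_def (question : String) :
    keyword_retriever_alt question =
      SORTED_IDS.filter (fun s => PySem.Set.contains
        (if pvSel (PySem.Str.lower question) = []
         then PySem.Set.ofList SECTION_IDS
         else pvSel (PySem.Str.lower question)) s) := rfl

-- A's four keyword tests, on the already-lowered question
def pvTest (kws : List String) (q : String) : Bool :=
  kws.any (fun w => PySem.Str.isIn w q)

-- both ports' final value as a function of the four section booleans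
def pvOut (b1 b2 b3 b4 : Bool) : List String :=
  if b1 || b2 || b3 || b4 then
    (if b3 then ["demographics"] else []) ++ (if b2 then ["product_region"] else [])
      ++ (if b4 then ["statistics"] else []) ++ (if b1 then ["time"] else [])
  else SORTED_IDS

-- A as a function of the booleans
def pvCoreA (b1 b2 b3 b4 : Bool) : List String :=
  let selected : PySem.Set String := PySem.Set.empty
  let selected := if b1 then PySem.Set.add selected "time" else selected
  let selected := if b2 then PySem.Set.add selected "product_region" else selected
  let selected := if b3 then PySem.Set.add selected "demographics" else selected
  let selected := if b4 then PySem.Set.add selected "statistics" else selected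
  let selected := if selected = [] then PySem.Set.ofList SECTION_IDS else selected
  PySem.List.sorted selected (fun x => x) false

theorem pvA_core (question : String) : keyword_retriever question =
    pvCoreA (pvTest ["time", "month", "quarter", "year", "trend", "growth", "season"] (PySem.Str.lower question))
            (pvTest ["product", "region", "place", "area", "west", "east", "north", "south"] (PySem.Str.lower question))
            (pvTest ["customer", "buyer", "demographic", "gender", "age", "segment"] (PySem.Str.lower question))
            (pvTest ["median", "mean", "std", "standard deviation", "stat", "distribution"] (PySem.Str.lower question)) := rfl

theorem pvCoreA_eq_pvOut : ∀ b1 b2 b3 b4 : Bool, pvCoreA b1 b2 b3 b4 = pvOut b1 b2 b3 b4 := by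
  intro b1 b2 b3 b4
  cases b1 <;> cases b2 <;> cases b3 <;> cases b4 <;>
    simp [pvCoreA, pvOut, PySem.Set.add, PySem.Set.contains, PySem.Set.empty, PySem.Set.ofList,
          SECTION_IDS, SORTED_IDS, PySem.List.sorted, PySem.List.insertBy] <;> decide

-- redundant 'sid not in selected' guard: conditional add with the guard is plain conditional Set.add
theorem pv_guard (acc : PySem.Set String) (x : String) (b : Bool) :
    (if !(PySem.Set.contains acc x) && b then PySem.Set.add acc x else acc)
      = (if b then PySem.Set.add acc x else acc) := by
  by_cases hm : x ∈ acc
  · have ha : PySem.Set.add acc x = acc := by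
      simp [PySem.Set.add, PySem.Set.contains, hm]
    simp [hm]
  · simp [PySem.Set.contains, hm]

-- membership in the inner (per-position) loop
theorem pv_mem_inner (ps : List (String × String)) (t : String → Bool)
    (acc : PySem.Set String) (x : String) :
    x ∈ ps.foldl (fun a2 p => if t p.1 then PySem.Set.add a2 p.2 else a2) acc
      ↔ x ∈ acc ∨ ∃ p ∈ ps, t p.1 = true ∧ p.2 = x := by
  induction ps generalizing acc with
  | nil => simp
  | cons p ps ih =>
    simp only [List.foldl_cons, List.mem_cons]
    by_cases ht : t p.1 = true
    · rw [if_pos ht, ih]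
      simp only [PySem.Set.mem_add]
      constructor
      · rintro ((hm | rfl) | ⟨p', hp', h1, h2⟩)
        · exact Or.inl hm
        · exact Or.inr ⟨p, Or.inl rfl, ht, rfl⟩
        · exact Or.inr ⟨p', Or.inr hp', h1, h2⟩
      · rintro (hm | ⟨p', (rfl | hp'), h1, h2⟩)
        · exact Or.inl (Or.inl hm)
        · exact Or.inl (Or.inr h2.symm)
        · exact Or.inr ⟨p', hp', h1, h2⟩
    · rw [if_neg ht, ih]
      constructor
      · rintro (hm | ⟨p', hp', h1, h2⟩)
        · exact Or.inl hm
        · exact Or.inr ⟨p', Or.inr hp', h1, h2⟩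
      · rintro (hm | ⟨p', (rfl | hp'), h1, h2⟩)
        · exact Or.inl hm
        · exact absurd h1 ht
        · exact Or.inr ⟨p', hp', h1, h2⟩

-- membership in the whole positional scan
theorem pv_mem_sel (q x : String) :
    x ∈ pvSel q ↔ ∃ i ∈ PySem.List.pyRange 0 (PySem.Str.len q) 1, ∃ p ∈ KEYWORD_SECTIONS,
      PySem.Chars.startswith (q.toList.drop i.toNat) p.1.toList = true ∧ p.2 = x := by
  rw [pvSel]
  simp only [pv_guard]
  generalize PySem.List.pyRange 0 (PySem.Str.len q) 1 = is
  have main : ∀ (is : List Int) (acc : PySem.Set String),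
      x ∈ is.foldl (fun acc i =>
          KEYWORD_SECTIONS.foldl
            (fun a2 p => if PySem.Chars.startswith (q.toList.drop i.toNat) p.1.toList
              then PySem.Set.add a2 p.2 else a2) acc) acc
        ↔ x ∈ acc ∨ ∃ i ∈ is, ∃ p ∈ KEYWORD_SECTIONS,
            PySem.Chars.startswith (q.toList.drop i.toNat) p.1.toList = true ∧ p.2 = x := by
    intro is
    induction is with
    | nil => simp
    | cons i is ih =>
      intro acc
      simp only [List.foldl_cons, List.mem_cons]
      rw [ih, pv_mem_inner KEYWORD_SECTIONS (fun w => PySem.Chars.startswith (List.drop i.toNat q.toList) w.toList)]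
      constructor
      · rintro ((h | ⟨p, hp, h1, h2⟩) | ⟨j, hj, hrest⟩)
        · exact Or.inl h
        · exact Or.inr ⟨i, Or.inl rfl, p, hp, h1, h2⟩
        · exact Or.inr ⟨j, Or.inr hj, hrest⟩
      · rintro (h | ⟨j, (rfl | hj), hrest⟩)
        · exact Or.inl (Or.inl h)
        · exact Or.inl (Or.inr hrest)
        · exact Or.inr ⟨j, hj, hrest⟩
  rw [main]
  simp [PySem.Set.empty]

-- a positional prefix match somewhere in range(len(q)) is exactly 'w in q' (w nonempty)
theorem pv_exists_prefix (w q : String) (hw : w.toList ≠ []) :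
    (∃ i ∈ PySem.List.pyRange 0 (PySem.Str.len q) 1,
        PySem.Chars.startswith (q.toList.drop i.toNat) w.toList = true)
      ↔ PySem.Str.isIn w q = true := by
  rw [PySem.Str.isIn_iff_infix]
  constructor
  · rintro ⟨i, hi, hp⟩
    rw [PySem.Chars.startswith, List.isPrefixOf_iff_prefix] at hp
    exact hp.isInfix.trans (List.drop_suffix i.toNat q.toList).isInfix
  · rintro ⟨s, t, hst⟩
    refine ⟨(s.length : Int), ?_, ?_⟩
    · rw [PySem.List.mem_pyRange_one, PySem.Str.len_eq]
      have hlen : s.length + (w.toList.length + t.length) = q.toList.length := by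
        rw [← hst]; simp
      have hwlen : 0 < w.toList.length := List.length_pos_of_ne_nil hw
      constructor
      · positivity
      · exact_mod_cast by omega
    · rw [PySem.Chars.startswith, List.isPrefixOf_iff_prefix]
      have hdrop : q.toList.drop s.length = w.toList ++ t := by
        rw [← hst]; simp
      rw [Int.toNat_natCast, hdrop]
      exact List.prefix_append _ _

-- the scan selects sid iff some of its keywords occurs in q
theorem pv_sel_iff (q sid : String) :
    (sid ∈ pvSel q) ↔ ∃ p ∈ KEYWORD_SECTIONS, p.2 = sid ∧ PySem.Str.isIn p.1 q = true := by
  rw [pv_mem_sel]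
  have hne : ∀ p ∈ KEYWORD_SECTIONS, p.1.toList ≠ [] := by decide
  constructor
  · rintro ⟨i, hi, p, hp, hsw, hsec⟩
    exact ⟨p, hp, hsec, (pv_exists_prefix p.1 q (hne p hp)).mp ⟨i, hi, hsw⟩⟩
  · rintro ⟨p, hp, hsec, hin⟩
    obtain ⟨i, hi, hsw⟩ := (pv_exists_prefix p.1 q (hne p hp)).mpr hin
    exact ⟨i, hi, p, hp, hsw, hsec⟩

theorem pv_sel_time (q : String) :
    ("time" ∈ pvSel q) ↔ pvTest ["time", "month", "quarter", "year", "trend", "growth", "season"] q = true := by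
  rw [pv_sel_iff]
  simp [KEYWORD_SECTIONS, pvTest]

theorem pv_sel_pr (q : String) :
    ("product_region" ∈ pvSel q) ↔ pvTest ["product", "region", "place", "area", "west", "east", "north", "south"] q = true := by
  rw [pv_sel_iff]
  simp [KEYWORD_SECTIONS, pvTest]

theorem pv_sel_dem (q : String) :
    ("demographics" ∈ pvSel q) ↔ pvTest ["customer", "buyer", "demographic", "gender", "age", "segment"] q = true := by
  rw [pv_sel_iff]
  simp [KEYWORD_SECTIONS, pvTest]

theorem pv_sel_stat (q : String) :
    ("statistics" ∈ pvSel q) ↔ pvTest ["median", "mean", "std", "standard deviation", "stat", "distribution"] q = true := by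
  rw [pv_sel_iff]
  simp [KEYWORD_SECTIONS, pvTest]

theorem pv_sel_sub (q : String) : ∀ x ∈ pvSel q,
    x = "time" ∨ x = "product_region" ∨ x = "demographics" ∨ x = "statistics" := by
  intro x hx
  rw [pv_mem_sel] at hx
  obtain ⟨i, hi, p, hp, hsw, rfl⟩ := hx
  have hall : ∀ p ∈ KEYWORD_SECTIONS,
      p.2 = "time" ∨ p.2 = "product_region" ∨ p.2 = "demographics" ∨ p.2 = "statistics" := by decide
  exact hall p hp

-- the tail of both ports, as a function of the four membership booleans
theorem pv_assemble (S : PySem.Set String) (b1 b2 b3 b4 : Bool)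
    (h1 : ("time" ∈ S) ↔ b1 = true) (h2 : ("product_region" ∈ S) ↔ b2 = true)
    (h3 : ("demographics" ∈ S) ↔ b3 = true) (h4 : ("statistics" ∈ S) ↔ b4 = true)
    (hsub : ∀ x ∈ S, x = "time" ∨ x = "product_region" ∨ x = "demographics" ∨ x = "statistics") :
    SORTED_IDS.filter (fun s => PySem.Set.contains
      (if S = [] then PySem.Set.ofList SECTION_IDS else S) s) = pvOut b1 b2 b3 b4 := by
  by_cases hS : S = []
  · subst hS
    rw [if_pos rfl]
    simp only [List.not_mem_nil, false_iff, Bool.not_eq_true] at h1 h2 h3 h4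
    rw [h1, h2, h3, h4]
    decide
  · rw [if_neg hS]
    have c1 : PySem.Set.contains S "time" = b1 := by
      rw [Bool.eq_iff_iff]
      simp only [PySem.Set.contains]
      rw [List.contains_iff_mem]
      exact h1
    have c2 : PySem.Set.contains S "product_region" = b2 := by
      rw [Bool.eq_iff_iff]
      simp only [PySem.Set.contains]
      rw [List.contains_iff_mem]
      exact h2
    have c3 : PySem.Set.contains S "demographics" = b3 := by
      rw [Bool.eq_iff_iff]
      simp only [PySem.Set.contains]
      rw [List.contains_iff_mem]
      exact h3
    have c4 : PySem.Set.contains S "statistics" = b4 := by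
      rw [Bool.eq_iff_iff]
      simp only [PySem.Set.contains]
      rw [List.contains_iff_mem]
      exact h4
    have hor : (b1 || b2 || b3 || b4) = true := by
      obtain ⟨x, hx⟩ := List.exists_mem_of_ne_nil S hS
      rcases hsub x hx with rfl | rfl | rfl | rfl
      · simp [h1.mp hx]
      · simp [h2.mp hx]
      · simp [h3.mp hx]
      · simp [h4.mp hx]
    rw [pvOut, if_pos hor]
    simp only [SORTED_IDS, List.filter, c1, c2, c3, c4]
    cases b1 <;> cases b2 <;> cases b3 <;> cases b4 <;> simp_all

-- ===== VERDICT (by name: the statement is the Claim_ definition above) =====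
theorem keyword_retriever_spec : Claim_equal_keyword_retriever := by
  intro question _
  unfold Spec_keyword_retriever
  rw [pvA_core, pvCoreA_eq_pvOut, pv_alt_def]
  exact (pv_assemble (pvSel (PySem.Str.lower question)) _ _ _ _
    (pv_sel_time _) (pv_sel_pr _) (pv_sel_dem _) (pv_sel_stat _) (pv_sel_sub _)).symm
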